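-- pv_equiv track=rewrite | github.com/renanbazinin/ib-trading-engine | src/bot/strategies/rsi_bb.py | _trailing_streak
-- ===== SOURCE A (Python) =====
-- def _trailing_streak(mask):
--     """Count consecutive True values ending at the most recent row.
--
--     `mask` is a 1-D iterable aligned with self.df rows. Walks backwards from
--     the last row and returns the length of the True streak (0 if the latest
--     row already fails the condition).
--     """
--     if mask is None:
--         return 0
--     try:
--         values = list(mask)
--     except TypeError:
--         return 0
--     streak = 0
--     for value in reversed(values):
--         if bool(value):
--             streak += 1
--         else:
--             break
--     return streak
-- ===== SOURCE B (Python) =====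
-- def _trailing_streak(mask):
--     """Length of the trailing run of truthy values, via one forward pass."""
--     if mask is None:
--         return 0
--     try:
--         values = list(mask)
--     except TypeError:
--         return 0
--     streak = 0
--     for value in values:
--         streak = streak + 1 if bool(value) else 0
--     return streak
-- ===== Notes on version B (the rewrite author's own statement) =====
-- stated objective: simpler
-- what changed: Replaces the backward reversed()-with-break walk by a single forward pass that increments a counter on truthy values and resets it to 0 on falsy ones.
import Mathlib
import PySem

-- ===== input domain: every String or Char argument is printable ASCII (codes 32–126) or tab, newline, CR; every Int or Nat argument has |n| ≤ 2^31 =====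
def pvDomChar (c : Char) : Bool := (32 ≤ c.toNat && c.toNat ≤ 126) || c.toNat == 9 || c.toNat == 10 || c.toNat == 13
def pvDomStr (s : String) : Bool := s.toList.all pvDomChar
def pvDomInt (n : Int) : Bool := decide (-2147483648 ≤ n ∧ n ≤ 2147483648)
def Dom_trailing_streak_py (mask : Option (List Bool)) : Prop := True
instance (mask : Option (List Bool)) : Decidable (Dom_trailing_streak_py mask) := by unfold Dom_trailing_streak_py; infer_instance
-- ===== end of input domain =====

-- B replaces A's backward walk-with-break by a forward pass that resets a counter on False (objective: simpler).

-- ===== PORT A =====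
-- A's loop over reversed(values) with break: count leading Trues of the reversed list.
def pvCountA : List Bool → Int
  | [] => 0
  | b :: t => if b then 1 + pvCountA t else 0

def trailing_streak_py (mask : Option (List Bool)) : Int :=
  match mask with
  | none => 0
  | some values => pvCountA values.reverse

-- ===== PORT B =====
def trailing_streak_py_alt (mask : Option (List Bool)) : Int :=
  match mask with
  | none => 0
  | some values => values.foldl (fun streak value => if value then streak + 1 else 0) 0

-- ===== PRECONDITION & SPEC =====
def Spec_trailing_streak_py (mask : Option (List Bool)) (out : Int) : Prop := out = trailing_streak_py_alt mask
instance (mask : Option (List Bool)) (out : Int) : Decidable (Spec_trailing_streak_py mask out) := by unfold Spec_trailing_streak_py; infer_instance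

-- ===== CLAIM (what is proved, stated in full; the proofs are below) =====
def Claim_equal_trailing_streak_py : Prop := ∀ (mask : Option (List Bool)), Dom_trailing_streak_py mask → Spec_trailing_streak_py mask (trailing_streak_py mask)

-- ===== LEMMAS AND PROOFS =====
theorem pvFoldl_eq_countA_reverse (l : List Bool) :
    l.foldl (fun streak value => if value then streak + 1 else 0) 0 = pvCountA l.reverse := by
  induction l using List.reverseRecOn with
  | nil => rfl
  | append_singleton t b ih =>
    rw [List.foldl_append, List.reverse_append]
    simp only [List.foldl_cons, List.foldl_nil, List.reverse_cons, List.reverse_nil,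
      List.nil_append, List.cons_append, pvCountA]
    cases b with
    | true => simp [ih]; omega
    | false => simp

-- ===== VERDICT (by name: the statement is the Claim_ definition above) =====
theorem trailing_streak_py_spec : Claim_equal_trailing_streak_py := by
  intro mask _
  unfold Spec_trailing_streak_py trailing_streak_py trailing_streak_py_alt
  cases mask with
  | none => rfl
  | some values => exact (pvFoldl_eq_countA_reverse values).symm
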